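-- pv_equiv track=rewrite | github.com/Kristopher38/SCMBot | scmbot/spiders/itemcrawler.py | split_chart_to_lists
-- ===== SOURCE A (Python) =====
-- def split_chart_to_lists(chart):
-- 	dates = []
-- 	prices = []
-- 	quantities = []
-- 	for chart_day in chart:
-- 		for i, chart_data in enumerate(chart_day):
-- 			date, price, quantity = chart_data
-- 			dates.append(date)
-- 			prices.append(price)
-- 			quantities.append(quantity)
-- 	return (dates, prices, quantities)
-- ===== SOURCE B (Python) =====
-- def split_chart_to_lists(chart):
--     flat = [row for chart_day in chart for row in chart_day]
--     if not flat:
--         return ([], [], [])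
--     dates, prices, quantities = map(list, zip(*flat))
--     return (dates, prices, quantities)
-- ===== Notes on version B (the rewrite author's own statement) =====
-- stated objective: alternative
-- what changed: Instead of A's single fused loop appending each field to three accumulators, B first flattens the two-level chart into one list of rows and then transposes it in one step with zip(*flat) (an unzip), guarding the empty case.
import Mathlib
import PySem

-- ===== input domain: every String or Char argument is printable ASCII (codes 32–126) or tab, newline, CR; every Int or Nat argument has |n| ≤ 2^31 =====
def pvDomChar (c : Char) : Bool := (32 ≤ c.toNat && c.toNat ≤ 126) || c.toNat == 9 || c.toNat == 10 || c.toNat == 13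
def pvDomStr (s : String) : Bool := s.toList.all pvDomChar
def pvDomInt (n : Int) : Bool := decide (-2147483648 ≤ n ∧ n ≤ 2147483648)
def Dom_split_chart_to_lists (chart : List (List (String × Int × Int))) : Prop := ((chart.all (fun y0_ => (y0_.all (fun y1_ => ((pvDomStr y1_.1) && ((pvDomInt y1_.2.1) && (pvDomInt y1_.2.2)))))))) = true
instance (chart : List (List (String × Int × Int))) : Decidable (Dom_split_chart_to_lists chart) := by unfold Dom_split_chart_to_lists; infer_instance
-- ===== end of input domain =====

-- B flattens the chart once and then transposes the flat list of triples in one step (zip(*flat) / unzip), instead of A's fused loop appending each field to three accumulators; same cost, different organisation.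

-- ===== PORT A =====
-- A: one loop over days, inner enumerate loop (the index i is unused), appending each field of the triple to three accumulator lists.
def split_chart_to_lists (chart : List (List (String × Int × Int))) : List String × List Int × List Int :=
  chart.foldl
    (fun st chart_day =>
      (PySem.List.enumerate chart_day).foldl
        (fun st p =>
          match p.2 with
          | (date, price, quantity) => (st.1 ++ [date], st.2.1 ++ [price], st.2.2 ++ [quantity]))
        st)
    ([], [], [])

-- ===== PORT B =====
-- zip(*flat) for a list of triples: structural recursion prepending each field (exact for triples).
def pvZipStar3 : List (String × Int × Int) → List String × List Int × List Int
  | [] => ([], [], [])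
  | (a, b, c) :: t =>
    let r := pvZipStar3 t
    (a :: r.1, b :: r.2.1, c :: r.2.2)

-- B: flatten the two-level chart into one row list, then transpose it with zip(*flat), guarding the empty case.
def split_chart_to_lists_alt (chart : List (List (String × Int × Int))) : List String × List Int × List Int :=
  let flat := chart.flatMap (fun chart_day => chart_day)
  if flat = [] then ([], [], [])
  else pvZipStar3 flat

-- ===== PRECONDITION & SPEC =====
def Spec_split_chart_to_lists (chart : List (List (String × Int × Int))) (out : List String × List Int × List Int) : Prop := out = split_chart_to_lists_alt chart
instance (chart : List (List (String × Int × Int))) (out : List String × List Int × List Int) : Decidable (Spec_split_chart_to_lists chart out) := by unfold Spec_split_chart_to_lists; infer_instance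

-- ===== CLAIM =====
def Claim_equal_split_chart_to_lists : Prop := ∀ (chart : List (List (String × Int × Int))), Dom_split_chart_to_lists chart → Spec_split_chart_to_lists chart (split_chart_to_lists chart)

-- ===== LEMMAS AND PROOFS =====

-- the inner enumerate-fold appends the day's three projections to the accumulator
theorem pv_inner_fold (day : List (String × Int × Int)) :
    ∀ (s : Int) (st : List String × List Int × List Int),
      (PySem.List.enumerate day s).foldl
        (fun st p =>
          match p.2 with
          | (date, price, quantity) => (st.1 ++ [date], st.2.1 ++ [price], st.2.2 ++ [quantity]))
        st
      = (st.1 ++ day.map (fun r => r.1),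
         st.2.1 ++ day.map (fun r => r.2.1),
         st.2.2 ++ day.map (fun r => r.2.2)) := by
  induction day with
  | nil => intro s st; simp [PySem.List.enumerate]
  | cons r rest ih =>
    intro s st
    obtain ⟨d, p, q⟩ := r
    rw [PySem.List.enumerate_cons, List.foldl_cons, ih]
    simp

-- the outer fold appends the flattened projections of all days
theorem pv_outer_fold (chart : List (List (String × Int × Int))) :
    ∀ (st : List String × List Int × List Int),
      chart.foldl
        (fun st chart_day =>
          (PySem.List.enumerate chart_day).foldl
            (fun st p =>
              match p.2 with
              | (date, price, quantity) => (st.1 ++ [date], st.2.1 ++ [price], st.2.2 ++ [quantity]))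
            st)
        st
      = (st.1 ++ chart.flatMap (fun day => day.map (fun r => r.1)),
         st.2.1 ++ chart.flatMap (fun day => day.map (fun r => r.2.1)),
         st.2.2 ++ chart.flatMap (fun day => day.map (fun r => r.2.2))) := by
  induction chart with
  | nil => intro st; simp
  | cons day rest ih =>
    intro st
    rw [List.foldl_cons, pv_inner_fold, ih]
    simp

-- the transpose of a flat list of triples is its three projections
theorem pv_zipStar3_eq (l : List (String × Int × Int)) :
    pvZipStar3 l = (l.map (fun r => r.1), l.map (fun r => r.2.1), l.map (fun r => r.2.2)) := by
  induction l with
  | nil => rfl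
  | cons r t ih =>
    obtain ⟨a, b, c⟩ := r
    simp [pvZipStar3, ih]

-- ===== VERDICT =====
theorem split_chart_to_lists_spec : Claim_equal_split_chart_to_lists := by
  intro chart _
  unfold Spec_split_chart_to_lists split_chart_to_lists split_chart_to_lists_alt
  rw [pv_outer_fold]
  by_cases h : chart.flatMap (fun chart_day => chart_day) = []
  · have h1 : chart.flatMap (fun day => day.map (fun r : String × Int × Int => r.1)) = [] := by
      simpa [List.map_flatMap] using congrArg (List.map (fun r : String × Int × Int => r.1)) h
    have h2 : chart.flatMap (fun day => day.map (fun r : String × Int × Int => r.2.1)) = [] := by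
      simpa [List.map_flatMap] using congrArg (List.map (fun r : String × Int × Int => r.2.1)) h
    have h3 : chart.flatMap (fun day => day.map (fun r : String × Int × Int => r.2.2)) = [] := by
      simpa [List.map_flatMap] using congrArg (List.map (fun r : String × Int × Int => r.2.2)) h
    rw [if_pos h, h1, h2, h3]
    rfl
  · rw [if_neg h, pv_zipStar3_eq]
    simp [List.flatMap]
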